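-- pv_equiv track=rewrite | github.com/roshinpv1/appgates | gates/criteria_evaluator.py | _apply_logic_operator
-- ===== SOURCE A (Python) =====
-- from typing import Dict, List, Any, Optional
--
-- def _apply_logic_operator(operator: str, items: List) -> bool:
--     """Apply AND/OR/NOT logic to a list of items"""
--
--     if not items:
--         return False
--
--     if operator == "AND":
--         # All items must be truthy
--         return all(bool(item) for item in items)
--
--     elif operator == "OR":
--         # At least one item must be truthy
--         return any(bool(item) for item in items)
--
--     elif operator == "NOT":
--         # No items should be truthy (inverse logic)
--         return not any(bool(item) for item in items)
--
--     else:
--         raise ValueError(f"Unknown operator: {operator}")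
-- ===== SOURCE B (Python) =====
-- def _apply_logic_operator(operator: str, items) -> bool:
--     """Apply AND/OR/NOT logic to a list of items"""
--     if not items:
--         return False
--     count = sum(1 for item in items if item)
--     if operator == "AND":
--         return count == len(items)
--     elif operator == "OR":
--         return count > 0
--     elif operator == "NOT":
--         return count == 0
--     else:
--         raise ValueError(f"Unknown operator: {operator}")
-- ===== Notes on version B (the rewrite author's own statement) =====
-- stated objective: alternative
-- what changed: Replaces the three separate short-circuiting all/any scans with a single full pass that counts truthy items, then each operator branch is a scalar comparison of that count (AND: count==len, OR: count>0, NOT: count==0).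
import Mathlib
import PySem

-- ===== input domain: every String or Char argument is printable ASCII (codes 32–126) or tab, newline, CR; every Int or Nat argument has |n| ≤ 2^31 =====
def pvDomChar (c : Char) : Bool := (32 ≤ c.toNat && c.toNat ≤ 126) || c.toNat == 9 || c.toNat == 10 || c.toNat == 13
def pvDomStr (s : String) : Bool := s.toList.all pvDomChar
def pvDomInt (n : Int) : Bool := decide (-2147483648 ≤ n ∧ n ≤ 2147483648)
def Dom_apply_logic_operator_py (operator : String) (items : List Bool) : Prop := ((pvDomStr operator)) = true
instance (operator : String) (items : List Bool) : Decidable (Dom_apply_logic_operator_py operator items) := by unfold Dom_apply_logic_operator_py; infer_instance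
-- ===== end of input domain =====

-- B replaces A's three separate all/any scans with one truthy-count pass reused by scalar
-- comparisons in each operator branch (objective: alternative; same cost).


-- ===== PORT A =====
def apply_logic_operator_py (operator : String) (items : List Bool) : Bool :=
  if items = [] then false
  else if operator == "AND" then items.all (fun item => item)
  else if operator == "OR" then items.any (fun item => item)
  else if operator == "NOT" then !(items.any (fun item => item))
  else false  -- raise ValueError: excluded by Pre_

-- ===== PORT B =====
def apply_logic_operator_py_alt (operator : String) (items : List Bool) : Bool :=
  if items = [] then false
  else
    let count : Int := items.foldl (fun acc item => if item then acc + 1 else acc) 0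
    if operator == "AND" then count == (items.length : Int)
    else if operator == "OR" then count > 0
    else if operator == "NOT" then count == 0
    else false  -- raise ValueError: excluded by Pre_

-- ===== PRECONDITION & SPEC =====
-- Pre_ excludes exactly the inputs where A raises ValueError: a non-empty list with an
-- operator other than "AND"/"OR"/"NOT" (B raises there too).
def Pre_apply_logic_operator_py (operator : String) (items : List Bool) : Prop :=
  items = [] ∨ operator = "AND" ∨ operator = "OR" ∨ operator = "NOT"
instance (operator : String) (items : List Bool) : Decidable (Pre_apply_logic_operator_py operator items) := by unfold Pre_apply_logic_operator_py; infer_instance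
def pvWitness_apply_logic_operator_py : String × List Bool := ("AND", [true, false])

def Spec_apply_logic_operator_py (operator : String) (items : List Bool) (out : Bool) : Prop := out = apply_logic_operator_py_alt operator items
instance (operator : String) (items : List Bool) (out : Bool) : Decidable (Spec_apply_logic_operator_py operator items out) := by unfold Spec_apply_logic_operator_py; infer_instance

-- ===== CLAIM (what is proved, stated in full; the proofs are below) =====
def Claim_equal_apply_logic_operator_py : Prop := ∀ (operator : String) (items : List Bool), Dom_apply_logic_operator_py operator items → Pre_apply_logic_operator_py operator items → Spec_apply_logic_operator_py operator items (apply_logic_operator_py operator items)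

-- ===== LEMMAS AND PROOFS =====

-- the truthy count is the number of `true` entries
theorem pv_count_eq_countP (items : List Bool) (acc : Int) :
    items.foldl (fun acc item => if item then acc + 1 else acc) acc
      = acc + (items.countP (fun b => b) : Int) := by
  induction items generalizing acc with
  | nil => simp
  | cons h t ih =>
    cases h <;> simp [List.countP_cons, ih] <;> ring

theorem pv_and_case (items : List Bool) :
    items.all (fun item => item)
      = ((items.countP (fun b => b) : Int) == (items.length : Int)) := by
  by_cases h : items.all (fun item => item) = true
  · have hc : items.countP (fun b => b) = items.length := by
      rw [List.countP_eq_length]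
      intro a ha; simpa using (List.all_eq_true.mp h a ha)
    simp [h, hc]
  · simp only [Bool.not_eq_true] at h
    have hne : items.countP (fun b => b) ≠ items.length := by
      intro he
      have hall : items.all (fun item => item) = true :=
        List.all_eq_true.mpr (fun a ha => by simpa using List.countP_eq_length.mp he a ha)
      simp [h] at hall
    rw [h]; symm; rw [beq_eq_false_iff_ne]
    exact fun he => hne (by exact_mod_cast he)

theorem pv_or_case (items : List Bool) :
    items.any (fun item => item)
      = decide ((items.countP (fun b => b) : Int) > 0) := by
  by_cases h : 0 < items.countP (fun b => b)
  · obtain ⟨a, ha, hpa⟩ := List.countP_pos_iff.mp h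
    have hany : items.any (fun item => item) = true := List.any_eq_true.mpr ⟨a, ha, hpa⟩
    have hpi : (0:Int) < (items.countP (fun b => b) : Int) := by exact_mod_cast h
    rw [hany, decide_eq_true hpi]
  · have h0 : items.countP (fun b => b) = 0 := by omega
    have hany : items.any (fun item => item) = false := by
      rw [List.any_eq_false]
      intro a ha; simpa using List.countP_eq_zero.mp h0 a ha
    simp [hany, h0]

theorem pv_not_case (items : List Bool) :
    (!items.any (fun item => item)) = ((items.countP (fun b => b) : Int) == 0) := by
  rw [pv_or_case]
  by_cases h0 : items.countP (fun b => b) = 0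
  · simp [h0]
  · have hpi : (0:Int) < (items.countP (fun b => b) : Int) := by
      exact_mod_cast Nat.pos_of_ne_zero h0
    rw [decide_eq_true hpi, Bool.not_true]
    symm; rw [beq_eq_false_iff_ne]
    exact fun he => h0 (by exact_mod_cast he)

-- ===== VERDICT (by name: the statement is the Claim_ definition above) =====
theorem apply_logic_operator_py_spec : Claim_equal_apply_logic_operator_py := by
  intro operator items _ hpre
  unfold Spec_apply_logic_operator_py apply_logic_operator_py apply_logic_operator_py_alt
  by_cases hnil : items = []
  · simp [hnil]
  · simp only [hnil, if_neg, if_false, pv_count_eq_countP, zero_add]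
    rcases hpre with h | h | h | h
    · exact absurd h hnil
    all_goals subst h
    · simp [pv_and_case]
    · simp [pv_or_case]
    · have h := pv_not_case items
      simp [← h, Bool.not_not]
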